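-- pv_equiv track=rewrite | github.com/rickyg365/scratch | league_autogui/league_auto_final/dec_bin.py | decimal_binary
-- ===== SOURCE A (Python) =====
-- def decimal_binary(number: int) -> int:
--     bits = []
--
--     copy = number
--
--     while copy >= 1:
--         bit_value = copy % 2
--         # added in reverse order
--         bits.append(f"{bit_value}")
--         copy = copy // 2
--
--     corrected_bits = bits[::-1]
--
--     return int("".join(corrected_bits))
-- ===== SOURCE B (Python) =====
-- def _bits(n: int) -> str:
--     # most-significant-first: no list, no reverse
--     if n < 1:
--         return ""
--     return _bits(n // 2) + str(n % 2)
--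
--
-- def decimal_binary(number: int) -> int:
--     return int(_bits(number))
-- ===== Notes on version B (the rewrite author's own statement) =====
-- stated objective: simpler
-- what changed: Replaces the explicit while-loop that appends LSB-first bit strings into a list, reverses it and joins, by a halving recursion that builds the digit string most-significant-first directly, with no list and no reverse.
import Mathlib
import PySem

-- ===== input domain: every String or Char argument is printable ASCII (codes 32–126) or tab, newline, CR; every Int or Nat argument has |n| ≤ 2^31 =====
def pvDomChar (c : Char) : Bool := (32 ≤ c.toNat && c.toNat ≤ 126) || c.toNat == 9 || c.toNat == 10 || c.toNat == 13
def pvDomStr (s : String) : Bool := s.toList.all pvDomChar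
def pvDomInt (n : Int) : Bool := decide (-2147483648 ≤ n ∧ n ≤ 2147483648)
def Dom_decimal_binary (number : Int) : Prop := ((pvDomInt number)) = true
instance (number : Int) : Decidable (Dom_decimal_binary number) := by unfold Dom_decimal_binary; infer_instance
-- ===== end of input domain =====

-- B replaces A's append-to-list/reverse/join loop by a halving recursion emitting digits
-- most-significant-first; objective: simpler (no list, no reverse), same cost.

-- ===== PORT A =====
-- the while-loop: state is (bits, copy); appends str(copy % 2), halves copy
def dbLoop (bits : List String) (copy : Int) : List String :=
  if 1 ≤ copy then
    dbLoop (bits ++ [PySem.Int.toStr (PySem.Int.mod copy 2)]) (PySem.Int.floordiv copy 2)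
  else bits
termination_by copy.toNat
decreasing_by
  rw [PySem.Int.floordiv_eq_ediv_of_pos (by omega : (0:Int) < 2)]
  omega

def decimal_binary (number : Int) : Int :=
  let bits := dbLoop [] number
  let corrected_bits := (PySem.List.slice? bits none none (-1)).getD []   -- bits[::-1]
  (PySem.Int.ofStr? (PySem.Str.join "" corrected_bits)).getD 0
  -- int("") raises ValueError in Python on non-positive input: Pre_ excludes those

-- ===== PORT B =====
-- recursive helper: digits most-significant-first
def dbMsb (n : Int) : String :=
  if n < 1 then ""
  else dbMsb (PySem.Int.floordiv n 2) ++ PySem.Int.toStr (PySem.Int.mod n 2)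
termination_by n.toNat
decreasing_by
  rw [PySem.Int.floordiv_eq_ediv_of_pos (by omega : (0:Int) < 2)]
  omega

def decimal_binary_alt (number : Int) : Int :=
  (PySem.Int.ofStr? (dbMsb number)).getD 0
  -- int("") raises ValueError in Python on non-positive input, excluded by Pre_

-- ===== PRECONDITION & SPEC =====
-- Python A (and B) raise ValueError (int("") on the empty digit string) for non-positive number: excluded.
def Pre_decimal_binary (number : Int) : Prop := 1 ≤ number
instance (number : Int) : Decidable (Pre_decimal_binary number) := by
  unfold Pre_decimal_binary; infer_instance

def pvWitness_decimal_binary : Int := (6)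

def Spec_decimal_binary (number : Int) (out : Int) : Prop := out = decimal_binary_alt number
instance (number : Int) (out : Int) : Decidable (Spec_decimal_binary number out) := by
  unfold Spec_decimal_binary; infer_instance

-- ===== CLAIM (what is proved, stated in full; the proofs are below) =====
def Claim_equal_decimal_binary : Prop := ∀ (number : Int), Dom_decimal_binary number → Pre_decimal_binary number → Spec_decimal_binary number (decimal_binary number)

-- ===== LEMMAS AND PROOFS =====

-- ''.join on an empty separator is concatenation
theorem chars_join_nil_eq_flatten (css : List (List Char)) :
    PySem.Chars.join [] css = css.flatten := by
  induction css with
  | nil => simp [PySem.Chars.join_nil]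
  | cons p rest ih =>
    cases rest with
    | nil => simp [PySem.Chars.join_singleton]
    | cons q r => simp [PySem.Chars.join_cons_cons, ih]

-- the loop's accumulator only gets appended to
theorem dbLoop_acc (n : Nat) : ∀ (c : Int), c.toNat = n →
    ∀ (acc : List String), dbLoop acc c = acc ++ dbLoop [] c := by
  induction n using Nat.strong_induction_on with
  | _ n ih =>
    intro c hc acc
    rw [dbLoop]
    conv_rhs => rw [dbLoop]
    by_cases h : 1 ≤ c
    · simp only [if_pos h]
      have hd : (PySem.Int.floordiv c 2).toNat < n := by
        rw [PySem.Int.floordiv_eq_ediv_of_pos (by omega : (0:Int) < 2)]; omega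
      rw [ih _ hd _ rfl, ih _ hd _ rfl (acc := [] ++ _)]
      simp
    · simp [h]

-- the join of the reversed LSB-first list is the MSB-first string
theorem join_dbLoop (n : Nat) : ∀ (c : Int), c.toNat = n →
    (PySem.Str.join "" (dbLoop [] c).reverse).toList = (dbMsb c).toList := by
  induction n using Nat.strong_induction_on with
  | _ n ih =>
    intro c hc
    rw [dbLoop, dbMsb]
    by_cases h : 1 ≤ c
    · have hd : (PySem.Int.floordiv c 2).toNat < n := by
        rw [PySem.Int.floordiv_eq_ediv_of_pos (by omega : (0:Int) < 2)]; omega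
      rw [if_pos h, if_neg (by omega : ¬ c < 1),
        dbLoop_acc _ (PySem.Int.floordiv c 2) rfl]
      have hih := ih _ hd (PySem.Int.floordiv c 2) rfl
      simp only [PySem.Str.toList_join, chars_join_nil_eq_flatten, List.reverse_append,
        List.reverse_cons, List.reverse_nil, List.nil_append, List.map_append, List.map_cons,
        List.map_nil, List.flatten_append, List.flatten_cons, List.flatten_nil,
        List.append_nil, String.toList_append, String.toList_empty] at hih ⊢
      rw [hih]
    · simp [h, PySem.Str.join, PySem.Chars.join_nil]

theorem join_dbLoop_str (c : Int) :
    PySem.Str.join "" (dbLoop [] c).reverse = dbMsb c := by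
  have h := join_dbLoop c.toNat c rfl
  exact String.ext h

-- ===== VERDICT (by name: the statement is the Claim_ definition above) =====
theorem decimal_binary_spec : Claim_equal_decimal_binary := by
  intro number _ _
  unfold Spec_decimal_binary decimal_binary decimal_binary_alt
  simp only [PySem.List.slice?_none_none_neg_one, Option.getD_some]
  rw [join_dbLoop_str]
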